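-- pv_equiv track=rewrite | github.com/reisset/yourSQLfriend | app.py | strip_strings_and_comments
-- ===== SOURCE A (Python) =====
-- def strip_strings_and_comments(sql):
--     """
--     Remove string literals and comments from SQL for security analysis.
--     This prevents false positives from content inside strings/comments.
--     """
--     result = []
--     i = 0
--     in_single_quote = False
--     in_double_quote = False
--
--     while i < len(sql):
--         # Handle single-line comments (-- style)
--         if not in_single_quote and not in_double_quote and sql[i:i+2] == '--':
--             # Skip to end of line
--             while i < len(sql) and sql[i] != '\n':
--                 i += 1
--             continue
--
--         # Handle multi-line comments (/* */ style)
--         if not in_single_quote and not in_double_quote and sql[i:i+2] == '/*':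
--             i += 2
--             while i < len(sql) - 1 and sql[i:i+2] != '*/':
--                 i += 1
--             i += 2  # Skip closing */
--             continue
--
--         # Handle single quotes (with escape handling)
--         if sql[i] == "'" and not in_double_quote:
--             if in_single_quote:
--                 # Check for escaped quote ('')
--                 if i + 1 < len(sql) and sql[i+1] == "'":
--                     i += 2
--                     continue
--                 in_single_quote = False
--             else:
--                 in_single_quote = True
--             i += 1
--             continue
--
--         # Handle double quotes
--         if sql[i] == '"' and not in_single_quote:
--             if in_double_quote:
--                 if i + 1 < len(sql) and sql[i+1] == '"':
--                     i += 2
--                     continue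
--                 in_double_quote = False
--             else:
--                 in_double_quote = True
--             i += 1
--             continue
--
--         # Only include characters outside of strings
--         if not in_single_quote and not in_double_quote:
--             result.append(sql[i])
--
--         i += 1
--
--     return ''.join(result)
-- ===== SOURCE B (Python) =====
-- def _skip_quoted(sql, i, q):
--     # consume the body of a quoted literal opened just before i; handles '' / "" doubling
--     n = len(sql)
--     while i < n:
--         if sql[i] == q:
--             if i + 1 < n and sql[i + 1] == q:
--                 i += 2
--             else:
--                 return i + 1
--         else:
--             i += 1
--     return n
--
-- def strip_strings_and_comments(sql):
--     out = []
--     i = 0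
--     n = len(sql)
--     while i < n:
--         c = sql[i]
--         if c == '-' and sql.startswith('--', i):
--             j = sql.find('\n', i)
--             i = n if j == -1 else j
--         elif c == '/' and sql.startswith('/*', i):
--             j = sql.find('*/', i + 2)
--             i = n if j == -1 else j + 2
--         elif c == "'":
--             i = _skip_quoted(sql, i + 1, "'")
--         elif c == '"':
--             i = _skip_quoted(sql, i + 1, '"')
--         else:
--             out.append(c)
--             i += 1
--     return ''.join(out)
-- ===== Notes on version B (the rewrite author's own statement) =====
-- stated objective: alternative
-- what changed: Replaces A's single index loop with in_single_quote/in_double_quote boolean flags (which filter each character at append time) by a flag-free tokenizer that dispatches on the current character and consumes each string literal or comment as one whole span via dedicated helpers (str.find for comments, a quote-skipping helper for literals), appending only code characters.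
import Mathlib
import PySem

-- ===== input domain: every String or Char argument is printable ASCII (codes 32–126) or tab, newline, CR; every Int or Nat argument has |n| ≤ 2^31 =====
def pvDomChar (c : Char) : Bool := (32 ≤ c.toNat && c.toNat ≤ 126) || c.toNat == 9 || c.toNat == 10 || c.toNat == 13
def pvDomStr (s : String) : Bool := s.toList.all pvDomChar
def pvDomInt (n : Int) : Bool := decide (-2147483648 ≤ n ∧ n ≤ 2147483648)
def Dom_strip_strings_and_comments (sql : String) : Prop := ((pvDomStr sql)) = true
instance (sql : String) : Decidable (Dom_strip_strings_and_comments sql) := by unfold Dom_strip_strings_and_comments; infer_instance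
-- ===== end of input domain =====

-- B replaces A's in-quote boolean-flag state machine by a flag-free tokenizer that
-- consumes each string literal / comment as one whole span (objective: alternative).

-- ===== PORT A =====
-- inner `while i < len(sql) and sql[i] != '\n': i += 1` of the `--` branch (keeps the '\n')
def aSkipLine : List Char → List Char
  | [] => []
  | c :: t => if c = '\n' then c :: t else aSkipLine t

-- inner `while i < len(sql)-1 and sql[i:i+2] != '*/': i += 1` then `i += 2` of the `/*` branch
def aSkipBlock : List Char → List Char
  | a :: b :: t => if a = '*' ∧ b = '/' then t else aSkipBlock (b :: t)
  | _ => []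

theorem aSkipLine_len (l : List Char) : (aSkipLine l).length ≤ l.length := by
  induction l with
  | nil => simp [aSkipLine]
  | cons c t ih =>
    simp only [aSkipLine]
    split
    · simp
    · simp only [List.length_cons]; omega

theorem aSkipBlock_len : ∀ (l : List Char), (aSkipBlock l).length ≤ l.length
  | [] => by simp [aSkipBlock]
  | [_] => by simp [aSkipBlock]
  | a :: b :: t => by
    simp only [aSkipBlock]
    split
    · simp only [List.length_cons]; omega
    · have := aSkipBlock_len (b :: t); simp only [List.length_cons] at *; omega

-- A's main `while` loop: one index scan with the in_single_quote / in_double_quote flags,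
-- appending a char only when both flags are off; `sql[i:i+2] == '--'` becomes "head is '-'
-- and the next char is '-'" (the leading char is consumed by the skip's first step).
def aLoop : List Char → Bool → Bool → List Char
  | [], _, _ => []
  | c :: t, sq, dq =>
    if !sq && !dq && c == '-' && t.head? == some '-' then
      aLoop (aSkipLine t) false false
    else if !sq && !dq && c == '/' && t.head? == some '*' then
      aLoop (aSkipBlock t.tail) false false
    else if c == '\'' && !dq then
      (if sq then
        (if t.head? == some '\'' then aLoop t.tail true dq
         else aLoop t false dq)
       else aLoop t true dq)
    else if c == '"' && !sq then
      (if dq then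
        (if t.head? == some '"' then aLoop t.tail sq true
         else aLoop t sq false)
       else aLoop t sq true)
    else if !sq && !dq then c :: aLoop t sq dq
    else aLoop t sq dq
termination_by l _ _ => l.length
decreasing_by
  · have := aSkipLine_len t; simp only [List.length_cons]; omega
  · have h1 := aSkipBlock_len t.tail
    have h2 : t.tail.length ≤ t.length := by cases t <;> simp
    simp only [List.length_cons]; omega
  · have : t.tail.length ≤ t.length := by cases t <;> simp
    simp only [List.length_cons]; omega
  · simp
  · simp
  · have : t.tail.length ≤ t.length := by cases t <;> simp
    simp only [List.length_cons]; omega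
  · simp
  · simp
  · simp
  · simp

def strip_strings_and_comments (sql : String) : String :=
  String.ofList (aLoop sql.toList false false)

-- ===== PORT B =====
-- `_skip_quoted(sql, i, q)`: consume a quoted literal's body, handling doubled quotes
def bSkipQuoted : List Char → Char → List Char
  | [], _ => []
  | c :: t, q =>
    if c = q then
      (if t.head? = some q then bSkipQuoted t.tail q else t)
    else bSkipQuoted t q
termination_by l _ => l.length
decreasing_by
  · have : t.tail.length ≤ t.length := by cases t <;> simp
    simp only [List.length_cons]; omega
  · simp

-- `j = sql.find('*/', i + 2); i = n if j == -1 else j + 2`: drop through the first "*/"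
def bSkipBlock : List Char → List Char
  | [] => []
  | c :: t => if c = '*' ∧ t.head? = some '/' then t.tail else bSkipBlock t

theorem bSkipQuoted_len : ∀ (l : List Char) (q : Char), (bSkipQuoted l q).length ≤ l.length
  | [], _ => by simp [bSkipQuoted]
  | c :: t, q => by
    simp only [bSkipQuoted]
    split
    · split
      · have h1 := bSkipQuoted_len t.tail q
        have h2 : t.tail.length ≤ t.length := by cases t <;> simp
        simp only [List.length_cons]; omega
      · simp only [List.length_cons]; omega
    · have := bSkipQuoted_len t q; simp only [List.length_cons]; omega
termination_by l _ => l.length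
decreasing_by
  · have : t.tail.length ≤ t.length := by cases t <;> simp
    simp only [List.length_cons]; omega
  · simp

theorem bSkipBlock_len : ∀ (l : List Char), (bSkipBlock l).length ≤ l.length
  | [] => by simp [bSkipBlock]
  | c :: t => by
    simp only [bSkipBlock]
    split
    · have : t.tail.length ≤ t.length := by cases t <;> simp
      simp only [List.length_cons]; omega
    · have := bSkipBlock_len t; simp only [List.length_cons]; omega

-- B's main loop: dispatch on the current character and consume whole spans
-- (`sql.find('\n', i)` + slice is `dropWhile (· ≠ '\n')` after the leading '-')
def bGo : List Char → List Char
  | [] => []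
  | c :: t =>
    if c == '-' && t.head? == some '-' then
      bGo (t.dropWhile (· ≠ '\n'))
    else if c == '/' && t.head? == some '*' then
      bGo (bSkipBlock t.tail)
    else if c == '\'' then
      bGo (bSkipQuoted t '\'')
    else if c == '"' then
      bGo (bSkipQuoted t '"')
    else c :: bGo t
termination_by l => l.length
decreasing_by
  · simp only [List.length_cons]
    exact Nat.lt_succ_of_le (List.length_dropWhile_le _ t)
  · have h1 := bSkipBlock_len t.tail
    have h2 : t.tail.length ≤ t.length := by cases t <;> simp
    simp only [List.length_cons]; omega
  · have := bSkipQuoted_len t '\''; simp only [List.length_cons]; omega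
  · have := bSkipQuoted_len t '"'; simp only [List.length_cons]; omega
  · simp

def strip_strings_and_comments_alt (sql : String) : String :=
  String.ofList (bGo sql.toList)

-- ===== PRECONDITION & SPEC =====
def Spec_strip_strings_and_comments (sql : String) (out : String) : Prop := out = strip_strings_and_comments_alt sql
instance (sql : String) (out : String) : Decidable (Spec_strip_strings_and_comments sql out) := by unfold Spec_strip_strings_and_comments; infer_instance

-- ===== CLAIM (what is proved, stated in full; the proofs are below) =====
def Claim_equal_strip_strings_and_comments : Prop := ∀ (sql : String), Dom_strip_strings_and_comments sql → Spec_strip_strings_and_comments sql (strip_strings_and_comments sql)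

-- ===== LEMMAS AND PROOFS =====

theorem skipLine_eq (l : List Char) : aSkipLine l = l.dropWhile (· ≠ '\n') := by
  induction l with
  | nil => simp [aSkipLine]
  | cons c t ih =>
    simp only [aSkipLine, List.dropWhile]
    split_ifs with h <;> simp_all

theorem skipBlock_eq : ∀ (l : List Char), aSkipBlock l = bSkipBlock l
  | [] => by simp [aSkipBlock, bSkipBlock]
  | [c] => by simp [aSkipBlock, bSkipBlock]
  | a :: b :: t => by
    by_cases h : a = '*' ∧ b = '/'
    · obtain ⟨h1, h2⟩ := h; subst h1 h2
      simp [aSkipBlock, bSkipBlock]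
    · have hA : aSkipBlock (a :: b :: t) = aSkipBlock (b :: t) := by
        simp only [aSkipBlock]; rw [if_neg h]
      have hB : bSkipBlock (a :: b :: t) = bSkipBlock (b :: t) := by
        show (if a = '*' ∧ (b :: t).head? = some '/' then (b :: t).tail
              else bSkipBlock (b :: t)) = bSkipBlock (b :: t)
        rw [if_neg (by simpa using h)]
      rw [hA, hB, skipBlock_eq (b :: t)]

theorem bSkipQuoted_cons_ne (c q : Char) (t : List Char) (h : ¬ c = q) :
    bSkipQuoted (c :: t) q = bSkipQuoted t q := by
  simp [bSkipQuoted, h]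

theorem main_equiv : ∀ (n : Nat) (l : List Char), l.length ≤ n →
    aLoop l false false = bGo l ∧
    aLoop l true false = bGo (bSkipQuoted l '\'') ∧
    aLoop l false true = bGo (bSkipQuoted l '"')
  | _, [], _ => by simp [aLoop, bGo, bSkipQuoted]
  | 0, _ :: _, hlen => by simp at hlen
  | Nat.succ n, c :: t, hlen => by
    have ht : t.length ≤ n := by simpa using hlen
    refine ⟨?_, ?_, ?_⟩
    -- conjunct 1: code mode
    · by_cases h1 : c = '-' ∧ t.head? = some '-'
      · obtain ⟨hc, hh⟩ := h1; subst hc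
        have hlen' : (aSkipLine t).length ≤ n := le_trans (aSkipLine_len t) ht
        have ih := (main_equiv n (aSkipLine t) hlen').1
        rw [skipLine_eq] at ih
        simp only [aLoop, bGo, hh]
        rw [skipLine_eq]
        simpa using ih
      · by_cases h2 : c = '/' ∧ t.head? = some '*'
        · obtain ⟨hc, hh⟩ := h2; subst hc
          have htt : t.tail.length ≤ t.length := by cases t <;> simp
          have hlen' : (aSkipBlock t.tail).length ≤ n :=
            le_trans (aSkipBlock_len t.tail) (le_trans htt ht)
          have ih := (main_equiv n (aSkipBlock t.tail) hlen').1
          rw [skipBlock_eq] at ih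
          simp [aLoop, bGo, hh, skipBlock_eq, ih]
        · by_cases h3 : c = '\''
          · subst h3
            have ih := (main_equiv n t ht).2.1
            simp [aLoop, bGo, ih]
          · by_cases h4 : c = '"'
            · subst h4
              have ih := (main_equiv n t ht).2.2
              simp [aLoop, bGo, ih]
            · have ih := (main_equiv n t ht).1
              have h1' : ¬(c == '-' && t.head? == some '-') = true := by
                simp only [Bool.and_eq_true, beq_iff_eq]; tauto
              have h2' : ¬(c == '/' && t.head? == some '*') = true := by
                simp only [Bool.and_eq_true, beq_iff_eq]; tauto
              simp [aLoop, bGo, h1', h2', h3, h4, ih]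
    -- conjunct 2: inside a single-quoted literal
    · by_cases h3 : c = '\''
      · subst h3
        cases t with
        | nil => simp [aLoop, bGo, bSkipQuoted]
        | cons c2 t2 =>
          have ht2 : t2.length ≤ n := by simp at ht; omega
          by_cases hq : c2 = '\''
          · subst hq
            have ih := (main_equiv n t2 ht2).2.1
            simp [aLoop, bSkipQuoted, ih]
          · have ih := (main_equiv n (c2 :: t2) ht).1
            simp [aLoop, bSkipQuoted, hq, ih]
      · have ih := (main_equiv n t ht).2.1
        simp [aLoop, h3, ih, bSkipQuoted_cons_ne c '\'' t h3]
    -- conjunct 3: inside a double-quoted literal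
    · by_cases h4 : c = '"'
      · subst h4
        cases t with
        | nil => simp [aLoop, bGo, bSkipQuoted]
        | cons c2 t2 =>
          have ht2 : t2.length ≤ n := by simp at ht; omega
          by_cases hq : c2 = '"'
          · subst hq
            have ih := (main_equiv n t2 ht2).2.2
            simp [aLoop, bSkipQuoted, ih]
          · have ih := (main_equiv n (c2 :: t2) ht).1
            simp [aLoop, bSkipQuoted, hq, ih]
      · have ih := (main_equiv n t ht).2.2
        simp [aLoop, h4, ih, bSkipQuoted_cons_ne c '"' t h4]

-- ===== VERDICT (by name: the statement is the Claim_ definition above) =====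
theorem strip_strings_and_comments_spec : Claim_equal_strip_strings_and_comments := by
  intro sql _
  unfold Spec_strip_strings_and_comments strip_strings_and_comments strip_strings_and_comments_alt
  exact congrArg String.ofList (main_equiv sql.toList.length sql.toList le_rfl).1
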